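-- pv_equiv track=rewrite | github.com/vgarcesp13/POO_Vs_Clases_TrabajoFinal | ProgramasCreados2/Ejercicio.py | Ejer36
-- ===== SOURCE A (Python) =====
-- def Ejer36(N):
--     V= N.split(',')
--     Acum= 0
--     Mayor= None
--     for i in range(len(V)):
--         n= int(V[i])
--         if i%2 == 0:
--             Acum+= n
--         else:
--             if Mayor == None:
--                 Mayor= n
--             else:
--                 if n > Mayor:
--                     Mayor= n
--     return("La suma de las posisiones pares da como resultado: ({}).\nEl numero mayor de las posiciones impares es: ({}).".format(Acum, Mayor))
-- ===== SOURCE B (Python) =====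
-- def Ejer36(N):
--     nums = [int(x) for x in N.split(',')]
--     Acum = sum(nums[::2])
--     odds = nums[1::2]
--     Mayor = max(odds) if odds else None
--     return("La suma de las posisiones pares da como resultado: ({}).\nEl numero mayor de las posiciones impares es: ({}).".format(Acum, Mayor))
-- ===== Notes on version B (the rewrite author's own statement) =====
-- stated objective: simpler
-- what changed: Replaces A's single index loop with interleaved parity branching and two hand-maintained accumulators by: parse all tokens once, then sum the even-index slice and take max of the odd-index slice with the built-in reductions.
import Mathlib
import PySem

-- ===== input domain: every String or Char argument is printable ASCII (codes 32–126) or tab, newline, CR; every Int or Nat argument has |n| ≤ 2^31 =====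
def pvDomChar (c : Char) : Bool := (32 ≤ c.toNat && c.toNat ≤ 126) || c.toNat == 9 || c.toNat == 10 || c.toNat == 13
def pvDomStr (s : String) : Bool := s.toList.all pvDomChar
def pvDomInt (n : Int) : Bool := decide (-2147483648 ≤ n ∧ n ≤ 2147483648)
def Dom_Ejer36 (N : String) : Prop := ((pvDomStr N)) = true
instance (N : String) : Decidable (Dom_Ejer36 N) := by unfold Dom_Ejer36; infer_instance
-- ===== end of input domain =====

-- B parses all tokens once and then reduces the even-index slice with sum and the odd-index
-- slice with max, instead of A's single index loop with parity branching (objective: simpler).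

-- shared output formatting (the final .format line, identical in A and B)
def pvFmt (acum : Int) (mayor : Option Int) : String :=
  "La suma de las posisiones pares da como resultado: (" ++ PySem.Int.toStr acum ++
  ").\nEl numero mayor de las posiciones impares es: (" ++
  (match mayor with | none => "None" | some n => PySem.Int.toStr n) ++ ")."

-- ===== PORT A =====
-- loop state: none = a ValueError was raised (excluded by Pre_), some (Acum, Mayor) otherwise.
-- V[i] is read with pyGetD (i is always in range, i ∈ range(len(V))); int(V[i]) via ofStr?.
def Ejer36 (N : String) : String :=
  let V := (PySem.Str.split? N ",").getD []
  let st := (PySem.List.pyRange 0 (PySem.List.len V) 1).foldl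
    (fun st i =>
      match st with
      | none => none
      | some (acum, mayor) =>
        match PySem.Int.ofStr? (PySem.List.pyGetD V i "") with
        | none => none
        | some n =>
          if PySem.Int.mod i 2 == 0 then some (acum + n, mayor)
          else
            match mayor with
            | none => some (acum, some n)
            | some mm => if n > mm then some (acum, some n) else some (acum, mayor))
    (some ((0 : Int), (none : Option Int)))
  match st with
  | some (acum, mayor) => pvFmt acum mayor
  | none => ""  -- unreachable under Pre_ (ValueError)

-- ===== PORT B =====
def Ejer36_alt (N : String) : String :=
  match ((PySem.Str.split? N ",").getD []).mapM PySem.Int.ofStr? with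
  | none => ""  -- ValueError, excluded by Pre_
  | some nums =>
    let acum := ((PySem.List.slice? nums none none 2).getD []).sum
    let odds := (PySem.List.slice? nums (some 1) none 2).getD []
    let mayor := if odds.isEmpty then none else PySem.List.max? odds (fun x => x)
    pvFmt acum mayor

-- ===== PRECONDITION & SPEC =====
-- Pre_ excludes exactly the inputs where int() raises ValueError on some comma-separated token
-- (both A and B raise there).
def Pre_Ejer36 (N : String) : Prop :=
  (((PySem.Str.split? N ",").getD []).all (fun t => (PySem.Int.ofStr? t).isSome)) = true
instance (N : String) : Decidable (Pre_Ejer36 N) := by unfold Pre_Ejer36; infer_instance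
def pvWitness_Ejer36 : String := "1,2,3,4"

def Spec_Ejer36 (N : String) (out : String) : Prop := out = Ejer36_alt N
instance (N : String) (out : String) : Decidable (Spec_Ejer36 N out) := by unfold Spec_Ejer36; infer_instance

-- ===== CLAIM (what is proved, stated in full; the proofs are below) =====
def Claim_equal_Ejer36 : Prop := ∀ (N : String), Dom_Ejer36 N → Pre_Ejer36 N → Spec_Ejer36 N (Ejer36 N)

-- ===== LEMMAS AND PROOFS =====

-- every-other element starting at the head
def pvEO {α : Type} : List α → List α
  | [] => []
  | [a] => [a]
  | a :: _ :: t => a :: pvEO t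

-- sum of even-index elements, with a flag saying whether the head is at an even index
def pvSumP : Bool → List Int → Int
  | _, [] => 0
  | true, n :: t => n + pvSumP false t
  | false, _ :: t => pvSumP true t

-- A's running max over the odd-index elements, same flag convention
def pvMaxP : Bool → Option Int → List Int → Option Int
  | _, m, [] => m
  | true, m, _ :: t => pvMaxP false m t
  | false, m, n :: t =>
    pvMaxP true (match m with
                 | none => some n
                 | some mm => if n > mm then some n else some mm) t

lemma pvEO_cons_tail {α : Type} (a : α) (t : List α) : pvEO (a :: t) = a :: pvEO t.tail := by
  cases t <;> rfl

lemma pvFilterMap_range_eq_pvEO {α : Type} (xs : List α) :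
    (List.range ((xs.length + 1) / 2)).filterMap (fun k => xs[2 * k]?) = pvEO xs := by
  induction xs using pvEO.induct with
  | case1 => simp [pvEO]
  | case2 a => simp [pvEO, List.range_succ]

  | case3 a b t ih =>
    have hc : (((a :: b :: t).length + 1) / 2) = (t.length + 1) / 2 + 1 := by
      simp; omega
    rw [hc, List.range_succ_eq_map, List.filterMap_cons, List.filterMap_map]
    have h : ((fun k => (a :: b :: t)[2 * k]?) ∘ (fun n => n + 1)) = (fun k => t[2 * k]?) := by
      funext k
      show (a :: b :: t)[2 * (k + 1)]? = t[2 * k]?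
      have h2 : 2 * (k + 1) = (2 * k + 1) + 1 := by omega
      rw [h2, List.getElem?_cons_succ, List.getElem?_cons_succ]
    rw [h, ih]
    rfl

lemma pvSlice2_none (xs : List Int) :
    PySem.List.slice? xs none none 2 = some (pvEO xs) := by
  simp only [PySem.List.slice?, PySem.List.sliceIndices]
  norm_num
  have h2 : (if 0 < xs.length then (((xs.length : Int) + 2 - 1) / 2).toNat else 0)
      = (xs.length + 1) / 2 := by split <;> omega
  have h1 : (fun x : Nat => xs[((2 : Int) * ↑x).toNat]?) = (fun k : Nat => xs[2 * k]?) := by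
    funext k
    have hk : ((2 : Int) * ↑k).toNat = 2 * k := by omega
    rw [hk]
  rw [h2, h1, pvFilterMap_range_eq_pvEO]

lemma pvSlice2_one (xs : List Int) :
    PySem.List.slice? xs (some 1) none 2 = some (pvEO xs.tail) := by
  simp only [PySem.List.slice?, PySem.List.sliceIndices]
  norm_num
  cases xs with
  | nil => simp [pvEO]
  | cons a t =>
    have h2 : (if 1 < (a :: t).length then
        ((((a :: t).length : Int) - min 1 ((a :: t).length : Int) + 2 - 1) / 2).toNat else 0)
        = (t.length + 1) / 2 := by
      simp only [List.length_cons]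
      split <;> push_cast <;> omega
    have h1 : (fun x : Nat => (a :: t)[(min 1 ((a :: t).length : Int) + 2 * ↑x).toNat]?)
        = (fun k : Nat => t[2 * k]?) := by
      funext k
      have hmin : min (1 : Int) (((a :: t).length : Int)) = 1 := by
        simp only [List.length_cons]; push_cast; omega
      have hidx : (min (1 : Int) (((a :: t).length : Int)) + 2 * ↑k).toNat = 2 * k + 1 := by
        rw [hmin]; omega
      rw [hidx, List.getElem?_cons_succ]
    rw [h2, h1, pvFilterMap_range_eq_pvEO, List.tail_cons]

-- parity of consecutive indices under Python's %
lemma pvParity (s : Int) : (PySem.Int.mod (s + 1) 2 == 0) = !(PySem.Int.mod s 2 == 0) := by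
  simp only [PySem.Int.mod, Int.fmod_eq_emod]
  have h := Int.emod_two_eq_zero_or_one s
  rcases h with h | h
  · have : (s + 1) % 2 = 1 := by omega
    simp [h, this]
  · have : (s + 1) % 2 = 0 := by omega
    simp [h, this]

-- the loop body of A's port, on (index, token) pairs
def pvG (st : Option (Int × Option Int)) (p : Int × String) : Option (Int × Option Int) :=
  match st with
  | none => none
  | some (acum, mayor) =>
    match PySem.Int.ofStr? p.2 with
    | none => none
    | some n =>
      if PySem.Int.mod p.1 2 == 0 then some (acum + n, mayor)
      else
        match mayor with
        | none => some (acum, some n)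
        | some mm => if n > mm then some (acum, some n) else some (acum, mayor)

lemma pvLoop_eq (toks : List String) : ∀ (s a : Int) (m : Option Int) (nums : List Int),
    toks.mapM PySem.Int.ofStr? = some nums →
    (PySem.List.enumerate toks s).foldl pvG (some (a, m)) =
      some (a + pvSumP (PySem.Int.mod s 2 == 0) nums,
            pvMaxP (PySem.Int.mod s 2 == 0) m nums) := by
  induction toks with
  | nil =>
    intro s a m nums h
    have hnil : nums = [] := by simpa using h.symm
    subst hnil
    simp [PySem.List.enumerate_nil, pvSumP, pvMaxP]
  | cons t rest ih =>
    intro s a m nums h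
    cases hn : PySem.Int.ofStr? t with
    | none => rw [List.mapM_cons, hn] at h; simp at h
    | some n =>
      cases hrest : rest.mapM PySem.Int.ofStr? with
      | none => rw [List.mapM_cons, hn, hrest] at h; simp at h
      | some ns =>
        have hnums : nums = n :: ns := by
          rw [List.mapM_cons, hn, hrest] at h; simpa using h.symm
        subst hnums
        rw [PySem.List.enumerate_cons, List.foldl_cons]
        by_cases hp : (PySem.Int.mod s 2 == 0) = true
        · have hstep : pvG (some (a, m)) (s, t) = some (a + n, m) := by
            simp only [pvG, hn, hp, if_true]
          rw [hstep, ih (s + 1) (a + n) m ns hrest, pvParity, hp]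
          simp only [Bool.not_true, pvSumP, pvMaxP]
          congr 2
          ring
        · have hp' : (PySem.Int.mod s 2 == 0) = false := by
            cases hq : (PySem.Int.mod s 2 == 0) <;> simp_all
          have hstep : pvG (some (a, m)) (s, t) =
              some (a, match m with
                       | none => some n
                       | some mm => if n > mm then some n else some mm) := by
            cases m with
            | none => simp only [pvG, hn, hp', Bool.false_eq_true, if_false]
            | some mm =>
              simp only [pvG, hn, hp', Bool.false_eq_true, if_false]
              by_cases hgt : n > mm <;> simp [hgt]
          rw [hstep, ih (s + 1) a _ ns hrest, pvParity, hp']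
          simp only [Bool.not_false, pvSumP, pvMaxP]

lemma pvSumP_eq (nums : List Int) : ∀ b,
    pvSumP b nums = (if b then pvEO nums else pvEO nums.tail).sum := by
  induction nums with
  | nil => intro b; cases b <;> simp [pvSumP, pvEO]
  | cons n t ih =>
    intro b
    cases b
    · simp only [pvSumP, ih true, List.tail_cons]
      simp
    · simp only [pvSumP, ih false, List.tail_cons]
      rw [pvEO_cons_tail]
      simp

-- A's max update step = max?'s step
def pvMStep (m : Option Int) (n : Int) : Option Int :=
  match m with
  | none => some n
  | some mm => if n > mm then some n else some mm

lemma pvMaxP_eq (nums : List Int) : ∀ (b : Bool) (m : Option Int),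
    pvMaxP b m nums = (if b then pvEO nums.tail else pvEO nums).foldl pvMStep m := by
  induction nums with
  | nil => intro b m; cases b <;> simp [pvMaxP, pvEO]
  | cons n t ih =>
    intro b m
    cases b
    · simp only [pvMaxP, ih true, List.tail_cons]
      rw [pvEO_cons_tail]
      simp [List.foldl_cons, pvMStep]
    · simp only [pvMaxP, ih false, List.tail_cons]
      rfl

lemma pvMax?_eq_foldl (odds : List Int) :
    PySem.List.max? odds (fun x => x) = odds.foldl pvMStep none := by
  have h : ∀ (m : Option Int),
      odds.foldl (fun acc x =>
        match acc with
        | none => some x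
        | some m => if (fun x : Int => x) m < (fun x : Int => x) x then some x else some m) m
      = odds.foldl pvMStep m := by
    induction odds with
    | nil => intro m; rfl
    | cons x t ih =>
      intro m
      simp only [List.foldl_cons]
      rw [ih]
      cases m with
      | none => rfl
      | some mm => simp [pvMStep, GT.gt]
  unfold PySem.List.max?
  convert h none using 2
  funext acc x
  cases acc with
  | none => rfl
  | some mm => congr 1

lemma pvFoldl_nonempty (odds : List Int) (h : ¬ odds.isEmpty) :
    (if odds.isEmpty then none else odds.foldl pvMStep none) = odds.foldl pvMStep none := by
  simp [h]

lemma pvMapM_of_all (toks : List String)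
    (h : toks.all (fun t => (PySem.Int.ofStr? t).isSome) = true) :
    ∃ nums, toks.mapM PySem.Int.ofStr? = some nums := by
  induction toks with
  | nil => exact ⟨[], rfl⟩
  | cons t rest ih =>
    simp only [List.all_cons, Bool.and_eq_true] at h
    obtain ⟨h1, h2⟩ := h
    obtain ⟨n, hn⟩ := Option.isSome_iff_exists.mp h1
    obtain ⟨ns, hns⟩ := ih h2
    exact ⟨n :: ns, by rw [List.mapM_cons, hn, hns]; rfl⟩

-- ===== VERDICT (by name: the statement is the Claim_ definition above) =====
theorem Ejer36_spec : Claim_equal_Ejer36 := by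
  intro N _ hpre
  unfold Spec_Ejer36 Ejer36 Ejer36_alt
  simp only []
  set V := (PySem.Str.split? N ",").getD [] with hV
  obtain ⟨nums, hnums⟩ := pvMapM_of_all V hpre
  rw [hnums]
  -- A's range loop = fold of pvG over enumerate
  have hfold :
      (PySem.List.pyRange 0 (PySem.List.len V) 1).foldl
        (fun st i =>
          match st with
          | none => none
          | some (acum, mayor) =>
            match PySem.Int.ofStr? (PySem.List.pyGetD V i "") with
            | none => none
            | some n =>
              if PySem.Int.mod i 2 == 0 then some (acum + n, mayor)
              else
                match mayor with
                | none => some (acum, some n)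
                | some mm => if n > mm then some (acum, some n) else some (acum, mayor))
        (some ((0 : Int), (none : Option Int)))
      = (PySem.List.enumerate V 0).foldl pvG (some ((0 : Int), (none : Option Int))) := by
    rw [PySem.List.enumerate_eq_map_pyRange V "", List.foldl_map]
    rfl
  rw [hfold, pvLoop_eq V 0 0 none nums hnums]
  have hmod0 : (PySem.Int.mod 0 2 == 0) = true := by decide
  rw [hmod0]
  simp only [pvSlice2_none, pvSlice2_one, Option.getD_some]
  rw [pvMax?_eq_foldl]
  have hsum : pvSumP true nums = (pvEO nums).sum := by rw [pvSumP_eq]; simp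
  have hmax : pvMaxP true none nums = (pvEO nums.tail).foldl pvMStep none := by
    rw [pvMaxP_eq]; simp
  rw [hsum, hmax]
  by_cases he : (pvEO nums.tail).isEmpty
  · have : pvEO nums.tail = [] := by simpa [List.isEmpty_iff] using he
    rw [this]
    simp
  · rw [pvFoldl_nonempty _ he]
    simp
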